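-- pv_equiv track=rewrite | github.com/10hajin15/Algorithm | 문제/프로그래머스/Lv.1/비밀지도.py | solution
-- ===== SOURCE A (Python) =====
-- def solution(n, arr1, arr2):
--     answer = []
--     a1 = []
--     a2 = []
--     for i in range(n):
--         a1.append(format(arr1[i], 'b').zfill(n))
--         a2.append(format(arr2[i], 'b').zfill(n))
--     for i, j in zip(a1, a2):
--         temp = ""
--         for k in range(n):
--             if i[k] == j[k] and i[k] == '0':
--                 temp += ' '
--             else:
--                 temp += '#'
--         answer.append(temp)
--     return answer
-- ===== SOURCE B (Python) =====
-- def solution(n, arr1, arr2):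
--     rows = []
--     for i in range(n):
--         r = arr1[i] | arr2[i]
--         cells = []
--         for _ in range(n):
--             r, bit = divmod(r, 2)
--             cells.append('#' if bit else ' ')
--         cells.reverse()
--         rows.append(''.join(cells))
--     return rows
-- ===== Notes on version B (the rewrite author's own statement) =====
-- stated objective: alternative
-- what changed: B never builds binary strings: it ORs the two row numbers and extracts the n bits arithmetically with divmod, building each row low-bit-first and reversing, instead of A's two pre-formatted zero-filled binary-string lists compared character by character; Pre_ excludes row values outside [0, 2**n), where A's rendering of the '-' sign as '#' and its truncation of over-wide binary strings to the first n characters are accidents of its string formatting.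
-- outside the precondition, e.g. on solution(1, [2], [0]): A returns ['#'], B returns [' ']; on solution(2, [-2, 0], [0, 0]): A returns ['##', '  '], B returns ['# ', '  ']
import Mathlib
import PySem

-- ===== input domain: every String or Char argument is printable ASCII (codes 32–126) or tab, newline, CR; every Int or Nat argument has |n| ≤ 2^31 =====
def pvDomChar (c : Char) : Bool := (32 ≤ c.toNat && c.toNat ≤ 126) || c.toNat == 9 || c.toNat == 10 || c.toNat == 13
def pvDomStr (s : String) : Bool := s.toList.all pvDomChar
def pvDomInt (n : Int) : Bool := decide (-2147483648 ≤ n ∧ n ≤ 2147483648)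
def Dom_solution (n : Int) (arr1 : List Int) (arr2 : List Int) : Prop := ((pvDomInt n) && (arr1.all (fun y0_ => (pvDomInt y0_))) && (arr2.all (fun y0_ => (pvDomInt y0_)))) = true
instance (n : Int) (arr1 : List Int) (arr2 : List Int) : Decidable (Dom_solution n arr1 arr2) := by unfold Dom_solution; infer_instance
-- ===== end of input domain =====

-- B never builds binary strings: it ORs the two row numbers and extracts the n bits
-- arithmetically with divmod, building each row low-bit-first and reversing
-- (objective: alternative).

-- ===== PORT A =====
def solution (n : Int) (arr1 : List Int) (arr2 : List Int) : List String :=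
  let p := (PySem.List.pyRange 0 n 1).foldl
    (fun (s : List (List Char) × List (List Char)) i =>
      (s.1 ++ [PySem.Chars.zfill (PySem.Int.toBinChars (PySem.List.pyGetD arr1 i 0)) n],
       s.2 ++ [PySem.Chars.zfill (PySem.Int.toBinChars (PySem.List.pyGetD arr2 i 0)) n])) ([], [])
  let answer := (p.1.zip p.2).foldl
    (fun (acc : List (List Char)) ij =>
      acc ++ [(PySem.List.pyRange 0 n 1).foldl
        (fun temp k =>
          if PySem.List.pyGetD ij.1 k ' ' = PySem.List.pyGetD ij.2 k ' ' ∧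
             PySem.List.pyGetD ij.1 k ' ' = '0'
          then temp ++ [' '] else temp ++ ['#']) []]) []
  answer.map String.ofList

-- ===== PORT B =====
-- the inner 'for _ in range(n): r, bit = divmod(r, 2); cells.append(…)' loop, then reverse
def pvRender (n : Int) (r : Int) : List Char :=
  ((PySem.List.pyRange 0 n 1).foldl
    (fun (st : Int × List Char) _ =>
      (PySem.Int.floordiv st.1 2,
       st.2 ++ [if PySem.Int.mod st.1 2 ≠ 0 then '#' else ' '])) (r, [])).2.reverse

def solution_alt (n : Int) (arr1 : List Int) (arr2 : List Int) : List String :=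
  (PySem.List.pyRange 0 n 1).foldl
    (fun (rows : List String) i =>
      rows ++ [String.ofList (pvRender n
        (PySem.Int.bor (PySem.List.pyGetD arr1 i 0) (PySem.List.pyGetD arr2 i 0)))]) []

-- ===== PRECONDITION & SPEC =====
-- Pre_ excludes (a) n larger than either list, where A raises IndexError, and (b) row values
-- outside [0, 2^n) among the first n entries, where A's rendering of the '-' sign as '#' and its
-- truncation of over-wide binary strings to the first n characters are accidents of its string
-- formatting (the problem's maps are n-bit values); B reads the bits numerically there.
def Pre_solution (n : Int) (arr1 : List Int) (arr2 : List Int) : Prop :=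
  n ≤ arr1.length ∧ n ≤ arr2.length ∧
  (∀ v ∈ arr1.take n.toNat, 0 ≤ v ∧ v < 2 ^ n.toNat) ∧
  (∀ v ∈ arr2.take n.toNat, 0 ≤ v ∧ v < 2 ^ n.toNat)
instance (n : Int) (arr1 : List Int) (arr2 : List Int) : Decidable (Pre_solution n arr1 arr2) := by
  unfold Pre_solution; infer_instance

def pvWitness_solution : Int × List Int × List Int := (2, [1, 2], [3, 0])

def Spec_solution (n : Int) (arr1 : List Int) (arr2 : List Int) (out : List String) : Prop := out = solution_alt n arr1 arr2
instance (n : Int) (arr1 : List Int) (arr2 : List Int) (out : List String) : Decidable (Spec_solution n arr1 arr2 out) := by unfold Spec_solution; infer_instance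

-- ===== CLAIM (what is proved, stated in full; the proofs are below) =====
def Claim_equal_solution : Prop := ∀ (n : Int) (arr1 : List Int) (arr2 : List Int), Dom_solution n arr1 arr2 → Pre_solution n arr1 arr2 → Spec_solution n arr1 arr2 (solution n arr1 arr2)

-- ===== LEMMAS AND PROOFS =====

-- the binary digits of m, empty for m = 0 (proof-side mirror of Nat.toDigits 2)
def pvBin : Nat → List Char
  | 0 => []
  | m+1 => pvBin ((m+1)/2) ++ [if (m+1) % 2 = 1 then '1' else '0']
decreasing_by exact Nat.div_lt_self (Nat.succ_pos m) one_lt_two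

-- format(m, 'b') for a Nat
def pvBN (m : Nat) : List Char := if m = 0 then ['0'] else pvBin m

-- the n characters of one rendered row, most significant bit first
def pvBitsMap (cT cF : Char) (N m : Nat) : List Char :=
  (List.range N).map (fun k => if m.testBit (N-1-k) then cT else cF)

lemma pvBin_chars : ∀ m : Nat, ∀ c ∈ pvBin m, c = '0' ∨ c = '1' := by
  intro m
  induction m using Nat.strong_induction_on with
  | _ m ih =>
    match m with
    | 0 => rw [pvBin]; simp
    | k+1 =>
      intro c hc
      rw [pvBin] at hc
      rcases List.mem_append.mp hc with h | h
      · exact ih ((k+1)/2) (Nat.div_lt_self (Nat.succ_pos k) one_lt_two) c h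
      · simp only [List.mem_singleton] at h; subst h
        split <;> simp

lemma pvBin_len : ∀ N m : Nat, m < 2 ^ N → (pvBin m).length ≤ N := by
  intro N
  induction N with
  | zero => intro m hm; interval_cases m; rw [pvBin]; simp
  | succ N ih =>
    intro m hm
    match m with
    | 0 => rw [pvBin]; simp
    | k+1 =>
      rw [pvBin]
      have h2 : (k+1)/2 < 2 ^ N := by
        rw [Nat.div_lt_iff_lt_mul two_pos]
        calc k+1 < 2 ^ (N+1) := hm
        _ = 2 ^ N * 2 := by ring
      simpa using ih ((k+1)/2) h2

lemma toDigitsCore_eq : ∀ m : Nat, ∀ fuel : Nat, ∀ ds : List Char,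
    0 < m → m ≤ fuel → Nat.toDigitsCore 2 fuel m ds = pvBin m ++ ds := by
  intro m
  induction m using Nat.strong_induction_on with
  | _ m ih =>
    intro fuel ds hm hf
    match fuel with
    | 0 => omega
    | f+1 =>
      rw [Nat.toDigitsCore]
      by_cases h2 : m / 2 = 0
      · have hm1 : m = 1 := by omega
        subst hm1
        rw [if_pos h2, pvBin]
        rw [show (0+1)/2 = 0 from rfl, pvBin]
        simp [Nat.digitChar]
      · rw [if_neg h2]
        have hlt : m / 2 < m := Nat.div_lt_self hm one_lt_two
        have hle : m / 2 ≤ f := by omega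
        rw [ih (m/2) hlt f _ (Nat.pos_of_ne_zero h2) hle]
        have hstep : pvBin m = pvBin (m/2) ++ [(m % 2).digitChar] := by
          match m, hm with
          | k+1, _ =>
            rw [pvBin]
            congr 1
            rcases Nat.mod_two_eq_zero_or_one (k+1) with h | h <;>
              simp [h, Nat.digitChar]
        rw [hstep, List.append_assoc, List.singleton_append]

lemma toBinChars_natCast (m : Nat) : PySem.Int.toBinChars (m : Int) = pvBN m := by
  unfold PySem.Int.toBinChars pvBN
  rw [if_neg (by omega)]
  simp only [Int.toNat_natCast]
  by_cases h : m = 0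
  · subst h; rfl
  · rw [if_neg h]
    unfold Nat.toDigits
    exact (toDigitsCore_eq m (m+1) [] (Nat.pos_of_ne_zero h) (by omega)).trans (by simp)

lemma pvBitsMap_zero (cT cF : Char) (N : Nat) :
    pvBitsMap cT cF N 0 = List.replicate N cF := by
  simp [pvBitsMap, Nat.zero_testBit, List.map_const']

lemma pvBitsMap_succ (cT cF : Char) (N m : Nat) :
    pvBitsMap cT cF (N+1) m
      = pvBitsMap cT cF N (m/2) ++ [if m.testBit 0 then cT else cF] := by
  unfold pvBitsMap
  rw [List.range_succ, List.map_append]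
  congr 1
  · refine List.map_congr_left ?_
    intro k hk
    have hk' : k < N := List.mem_range.mp hk
    have h1 : N + 1 - 1 - k = (N - 1 - k) + 1 := by omega
    rw [h1, Nat.testBit_succ]
  · simp

lemma pad_bin : ∀ N : Nat, ∀ m : Nat, 0 < N → m < 2 ^ N →
    List.replicate (N - (pvBN m).length) '0' ++ pvBN m = pvBitsMap '1' '0' N m := by
  intro N
  induction N with
  | zero => intro m h; omega
  | succ N ih =>
    intro m _ hm
    by_cases h0 : m = 0
    · subst h0
      rw [pvBitsMap_zero, show pvBN 0 = ['0'] from rfl]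
      simp [List.replicate_succ']
    · by_cases h1 : m = 1
      · subst h1
        rw [pvBitsMap_succ, show (1:Nat)/2 = 0 from rfl, pvBitsMap_zero]
        have h1' : pvBN 1 = ['1'] := by
          rw [pvBN, if_neg one_ne_zero, pvBin, show (0+1)/2 = 0 from rfl, pvBin]
          simp
        rw [h1']
        simp
      · -- m ≥ 2
        have hm2 : 2 ≤ m := by omega
        have hN : 0 < N := by
          by_contra h
          have : N = 0 := by omega
          subst this; omega
        have hd : m / 2 ≠ 0 := by omega
        have hlt : m / 2 < 2 ^ N := by
          rw [Nat.div_lt_iff_lt_mul two_pos]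
          calc m < 2 ^ (N+1) := hm
          _ = 2 ^ N * 2 := by ring
        have hbn : pvBN m = pvBN (m/2) ++ [if m % 2 = 1 then '1' else '0'] := by
          match m, hm2 with
          | k+1, _ =>
            simp only [pvBN, if_neg h0, if_neg hd]
            rw [pvBin]
        rw [pvBitsMap_succ, ← ih (m/2) hN hlt, hbn]
        have hlen : N + 1 - (pvBN (m/2) ++ [if m % 2 = 1 then '1' else '0']).length
            = N - (pvBN (m/2)).length := by simp
        rw [hlen, ← List.append_assoc]
        congr 1
        rw [Nat.testBit_zero]
        rcases Nat.mod_two_eq_zero_or_one m with h | h <;> simp [h]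

lemma pvBN_len (N m : Nat) (hN : 0 < N) (hm : m < 2 ^ N) : (pvBN m).length ≤ N := by
  unfold pvBN
  split
  · simpa using hN
  · exact pvBin_len N m hm

lemma pvBin_ne_nil : ∀ m : Nat, 0 < m → pvBin m ≠ [] := by
  intro m hm
  match m, hm with
  | k+1, _ => rw [pvBin]; simp

lemma zfill_bin (N : Nat) (m : Nat) (hN : 0 < N) (hm : m < 2 ^ N) :
    PySem.Chars.zfill (PySem.Int.toBinChars (m : Int)) (N : Int)
      = pvBitsMap '1' '0' N m := by
  rw [toBinChars_natCast]
  have hlen : (pvBN m).length ≤ N := pvBN_len N m hN hm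
  have hne : pvBN m ≠ [] := by
    unfold pvBN; split
    · simp
    · exact pvBin_ne_nil m (by omega)
  have hchars : ∀ x ∈ pvBN m, x = '0' ∨ x = '1' := by
    unfold pvBN; split
    · simp
    · exact pvBin_chars m
  have hpad := pad_bin N m hN hm
  obtain ⟨c, rest, hbn⟩ : ∃ c rest, pvBN m = c :: rest := by
    cases h : pvBN m with
    | nil => exact absurd h hne
    | cons c rest => exact ⟨c, rest, rfl⟩
  have hc : c = '0' ∨ c = '1' := hchars c (by rw [hbn]; simp)
  rw [hbn] at hpad hlen ⊢
  unfold PySem.Chars.zfill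
  by_cases hcase : (N : Int) ≤ ((c :: rest).length : Int)
  · rw [if_pos hcase]
    have heq : (c :: rest).length = N := by simp only [List.length_cons] at hlen hcase ⊢; omega
    rwa [heq, Nat.sub_self, List.replicate_zero, List.nil_append] at hpad
  · rw [if_neg hcase]
    simp only [if_neg (show ¬ (c = '+' ∨ c = '-') by rcases hc with h | h <;> subst h <;> simp)]
    rwa [show (N : Int).toNat = N from rfl]

-- B's divmod loop: state after running over any list l, started at a nonnegative value
lemma render_loop : ∀ (l : List Int) (m : Nat) (cs : List Char),
    l.foldl (fun (st : Int × List Char) _ =>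
        (PySem.Int.floordiv st.1 2,
         st.2 ++ [if PySem.Int.mod st.1 2 ≠ 0 then '#' else ' '])) ((m : Int), cs)
      = (((m / 2 ^ l.length : Nat) : Int),
         cs ++ (List.range l.length).map (fun j => if m.testBit j then '#' else ' ')) := by
  intro l
  induction l with
  | nil => intro m cs; simp
  | cons x t ih =>
    intro m cs
    rw [List.foldl_cons]
    have hfd : PySem.Int.floordiv (m : Int) 2 = ((m / 2 : Nat) : Int) := by
      exact_mod_cast PySem.Int.floordiv_natCast m 2
    have hmd : PySem.Int.mod (m : Int) 2 = ((m % 2 : Nat) : Int) := by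
      exact_mod_cast PySem.Int.mod_natCast m 2
    have hbit : (if PySem.Int.mod (m : Int) 2 ≠ 0 then '#' else ' ')
        = (if m.testBit 0 then '#' else ' ') := by
      rw [hmd, Nat.testBit_zero]
      rcases Nat.mod_two_eq_zero_or_one m with h | h <;> simp [h]
    rw [hfd, hbit, ih (m/2)]
    refine Prod.ext ?_ ?_
    · simp only
      rw [Nat.div_div_eq_div_mul]
      norm_num [List.length_cons, pow_succ]
      ring_nf
    · simp only [List.length_cons]
      rw [List.range_succ_eq_map, List.map_cons, List.map_map, List.append_assoc,
        List.singleton_append]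
      congr 2
      refine List.map_congr_left ?_
      intro j _
      simp [Function.comp, Nat.succ_eq_add_one, Nat.testBit_succ]

lemma reverse_map_range {α : Type} (N : Nat) (f : Nat → α) :
    ((List.range N).map f).reverse = (List.range N).map (fun k => f (N-1-k)) := by
  apply List.ext_getElem
  · simp
  · intro i h1 h2
    simp only [List.length_reverse, List.length_map, List.length_range] at h1 h2 ⊢
    rw [List.getElem_reverse]
    simp

lemma render_eq (n : Int) (m : Nat) :
    pvRender n (m : Int) = pvBitsMap '#' ' ' n.toNat m := by
  unfold pvRender
  rw [render_loop]
  have hlen : (PySem.List.pyRange 0 n 1).length = n.toNat := by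
    rw [PySem.List.pyRange_one]; simp
  simp only [hlen, List.nil_append]
  rw [reverse_map_range]
  rfl

-- one row: A's character-comparison row equals B's rendered OR row
lemma row_eq (n : Int) (hn : 0 < n) (a b : Int) (ha : 0 ≤ a) (hb : 0 ≤ b)
    (ha2 : a < 2 ^ n.toNat) (hb2 : b < 2 ^ n.toNat) :
    (PySem.List.pyRange 0 n 1).foldl
      (fun (temp : List Char) k =>
        if PySem.List.pyGetD (PySem.Chars.zfill (PySem.Int.toBinChars a) n) k ' '
             = PySem.List.pyGetD (PySem.Chars.zfill (PySem.Int.toBinChars b) n) k ' ' ∧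
           PySem.List.pyGetD (PySem.Chars.zfill (PySem.Int.toBinChars a) n) k ' ' = '0'
        then temp ++ [' '] else temp ++ ['#']) []
      = pvRender n (PySem.Int.bor a b) := by
  obtain ⟨a', rfl⟩ : ∃ a' : Nat, a = (a' : Int) := ⟨a.toNat, by omega⟩
  obtain ⟨b', rfl⟩ : ∃ b' : Nat, b = (b' : Int) := ⟨b.toNat, by omega⟩
  have hN : 0 < n.toNat := by omega
  have hn0 : (n.toNat : Int) = n := by omega
  have ha' : a' < 2 ^ n.toNat := by exact_mod_cast ha2
  have hb' : b' < 2 ^ n.toNat := by exact_mod_cast hb2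
  rw [PySem.Int.bor_natCast, render_eq]
  have hfun : (fun (temp : List Char) (k : Int) =>
      if PySem.List.pyGetD (PySem.Chars.zfill (PySem.Int.toBinChars (a':Int)) n) k ' '
           = PySem.List.pyGetD (PySem.Chars.zfill (PySem.Int.toBinChars (b':Int)) n) k ' ' ∧
         PySem.List.pyGetD (PySem.Chars.zfill (PySem.Int.toBinChars (a':Int)) n) k ' ' = '0'
      then temp ++ [' '] else temp ++ ['#'])
      = (fun temp k => temp ++
          [if PySem.List.pyGetD (PySem.Chars.zfill (PySem.Int.toBinChars (a':Int)) n) k ' '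
               = PySem.List.pyGetD (PySem.Chars.zfill (PySem.Int.toBinChars (b':Int)) n) k ' ' ∧
             PySem.List.pyGetD (PySem.Chars.zfill (PySem.Int.toBinChars (a':Int)) n) k ' ' = '0'
           then ' ' else '#']) := by
    funext temp k; split <;> rfl
  rw [hfun, PySem.List.foldl_append_singleton_eq_map, List.nil_append,
    PySem.List.pyRange_one, List.map_map]
  rw [← hn0, zfill_bin n.toNat a' hN ha', zfill_bin n.toNat b' hN hb']
  simp only [Int.sub_zero, Int.toNat_natCast]
  unfold pvBitsMap
  refine List.map_congr_left ?_
  intro k hk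
  have hk' : k < n.toNat := List.mem_range.mp hk
  simp only [Function.comp, zero_add, PySem.List.pyGetD_natCast]
  rw [PySem.List.getD_map_range _ _ _ _ hk', PySem.List.getD_map_range _ _ _ _ hk']
  rw [Nat.testBit_or]
  rcases ha1 : a'.testBit (n.toNat - 1 - k) <;> rcases hb1 : b'.testBit (n.toNat - 1 - k) <;>
    simp

-- ===== VERDICT (by name: the statement is the Claim_ definition above) =====
theorem solution_spec : Claim_equal_solution := by
  intro n arr1 arr2 _hdom hpre
  obtain ⟨h1, h2, hv1, hv2⟩ := hpre
  show solution n arr1 arr2 = solution_alt n arr1 arr2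
  simp only [solution, solution_alt]
  rw [PySem.List.foldl_prod_mk
    (fun acc i => acc ++ [PySem.Chars.zfill (PySem.Int.toBinChars (PySem.List.pyGetD arr1 i 0)) n])
    (fun acc i => acc ++ [PySem.Chars.zfill (PySem.Int.toBinChars (PySem.List.pyGetD arr2 i 0)) n])]
  rw [PySem.List.foldl_append_singleton_eq_map, PySem.List.foldl_append_singleton_eq_map]
  simp only [List.nil_append]
  rw [PySem.List.foldl_append_singleton_eq_map, List.nil_append,
    PySem.List.foldl_append_singleton_eq_map, List.nil_append]
  rw [List.zip_map']
  rw [List.map_map, List.map_map]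
  refine List.map_congr_left ?_
  intro i hi
  obtain ⟨hi0, hin⟩ := PySem.List.mem_pyRange_one.mp hi
  obtain ⟨k, rfl⟩ : ∃ k : Nat, i = (k : Int) := ⟨i.toNat, by omega⟩
  have hn : 0 < n := by omega
  have hk1 : k < arr1.length := by omega
  have hk2 : k < arr2.length := by omega
  simp only [Function.comp, PySem.List.pyGetD_natCast]
  have e1 : arr1.getD k 0 = arr1[k] := List.getD_eq_getElem _ _ hk1
  have e2 : arr2.getD k 0 = arr2[k] := List.getD_eq_getElem _ _ hk2
  have hm1 : arr1[k] ∈ arr1.take n.toNat := by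
    have : (arr1.take n.toNat)[k]'(by simp; omega) = arr1[k] := List.getElem_take
    exact this ▸ List.getElem_mem _
  have hm2 : arr2[k] ∈ arr2.take n.toNat := by
    have : (arr2.take n.toNat)[k]'(by simp; omega) = arr2[k] := List.getElem_take
    exact this ▸ List.getElem_mem _
  obtain ⟨ha, ha2⟩ := hv1 _ hm1
  obtain ⟨hb, hb2⟩ := hv2 _ hm2
  rw [e1, e2]
  exact congrArg String.ofList (row_eq n hn arr1[k] arr2[k] ha hb ha2 hb2)
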